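-- pv_equiv track=rewrite | github.com/CillianHourican/Synergistic-Networks | toy_symptom_model.py | generate_XOR_transitions_table
-- ===== SOURCE A (Python) =====
-- import itertools
--
-- def generate_XOR_transitions_table(graph, dependent_vars):
--     #ToDo: allow for more then two dependent variables
--
--     # list of dependent vars
--     n = len(graph)
--
--     # Generate a list of lists
--     lst = [list(i) for i in itertools.product([0, 1], repeat=n)]
--
--     # Generate XOR
--     for _,i in enumerate(lst):
--         if i[dependent_vars[0]] != i[dependent_vars[1]]:
--             lst[_].append(1)
--         else:
--            lst[_].append(0)
--
--     return(lst)
-- ===== SOURCE B (Python) =====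
-- def generate_XOR_transitions_table(graph, dependent_vars):
--     n = len(graph)
--     size = 2 ** n
--     # Build the table column-wise: column j is the block pattern 0^b 1^b repeated,
--     # with b = 2**(n-1-j); the XOR column is the elementwise xor of the two
--     # dependent columns.  Rows are obtained by transposing the columns.
--     cols = []
--     for j in range(n):
--         block = 2 ** (n - 1 - j)
--         cols.append(([0] * block + [1] * block) * (2 ** j))
--     xor_col = [a ^ b for a, b in zip(cols[dependent_vars[0]], cols[dependent_vars[1]])]
--     cols.append(xor_col)
--     return [list(row) for row in zip(*cols)]
-- ===== Notes on version B (the rewrite author's own statement) =====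
-- stated objective: alternative
-- what changed: B constructs the truth table column-wise — column j is the repeated block pattern 0^b 1^b with b = 2**(n-1-j), the XOR column is an elementwise xor of the two dependent columns — and transposes with zip(*cols), instead of A's row-wise enumeration via itertools.product and per-row index comparison.
import Mathlib
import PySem

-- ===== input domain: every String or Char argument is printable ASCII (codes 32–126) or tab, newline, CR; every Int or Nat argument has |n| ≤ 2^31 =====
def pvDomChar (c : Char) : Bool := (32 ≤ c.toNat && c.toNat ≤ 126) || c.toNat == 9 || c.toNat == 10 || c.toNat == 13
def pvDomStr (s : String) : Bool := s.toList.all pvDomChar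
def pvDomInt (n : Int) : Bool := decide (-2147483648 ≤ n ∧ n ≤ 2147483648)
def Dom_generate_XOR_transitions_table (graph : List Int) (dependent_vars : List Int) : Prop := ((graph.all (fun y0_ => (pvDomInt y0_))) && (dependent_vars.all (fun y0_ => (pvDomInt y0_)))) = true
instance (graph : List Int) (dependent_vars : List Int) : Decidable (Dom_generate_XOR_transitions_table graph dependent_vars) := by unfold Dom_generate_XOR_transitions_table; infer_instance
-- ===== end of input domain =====

-- B builds the truth table COLUMN-wise (column j is the block pattern 0^b 1^b repeated,
-- the XOR column is an elementwise xor of the two dependent columns) and transposes,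
-- instead of A's row-wise itertools.product enumeration; same values, same order.

-- ===== PORT A =====
-- itertools.product([0,1], repeat=n), via its documented pure-Python equivalent
-- result = [[]]; n times: result = [x + [y] for x in result for y in [0, 1]]
def pvProduct01 : Nat → List (List Int)
  | 0 => [[]]
  | n + 1 => (pvProduct01 n).flatMap (fun r => [r ++ [0], r ++ [1]])

-- i[dependent_vars[0]] / i[dependent_vars[1]] (Python negative indexing; none = IndexError,
-- excluded by Pre_), then append 1 iff they differ
def pvXorAppend (dependent_vars : List Int) (r : List Int) : List Int :=
  let a := (PySem.List.pyGet? dependent_vars 0).bind (fun d => PySem.List.pyGet? r d)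
  let b := (PySem.List.pyGet? dependent_vars 1).bind (fun d => PySem.List.pyGet? r d)
  r ++ [if a ≠ b then 1 else 0]

def generate_XOR_transitions_table (graph : List Int) (dependent_vars : List Int) : List (List Int) :=
  let n := graph.length
  let lst := pvProduct01 n
  lst.map (fun i => pvXorAppend dependent_vars i)

-- ===== PORT B =====
-- Python `lst * k`
def pvRepeat (L : List Int) (k : Nat) : List Int := (List.replicate k L).flatten

-- `([0] * block + [1] * block) * (2 ** j)`
def pvCol (n j : Nat) : List Int :=
  pvRepeat (List.replicate (2 ^ (n - 1 - j)) 0 ++ List.replicate (2 ^ (n - 1 - j)) 1) (2 ^ j)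

def generate_XOR_transitions_table_alt (graph : List Int) (dependent_vars : List Int) : List (List Int) :=
  let n := graph.length
  let size := 2 ^ n
  let cols := (List.range n).map (fun j => pvCol n j)
  -- cols[dependent_vars[0]] / cols[dependent_vars[1]] (negative indexing; a none here is an
  -- IndexError in Python, excluded by Pre_; .getD [] only makes the port total)
  let c0 := ((PySem.List.pyGet? dependent_vars 0).bind (fun d => PySem.List.pyGet? cols d)).getD []
  let c1 := ((PySem.List.pyGet? dependent_vars 1).bind (fun d => PySem.List.pyGet? cols d)).getD []
  -- Python `a ^ b` on ints (here always 0/1 bits)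
  let xor_col := List.zipWith (fun a b => Int.xor a b) c0 c1
  let cols2 := cols ++ [xor_col]
  -- zip(*cols): every column has length 2^n, so the transpose is row i ↦ the i-th entries
  (List.range size).map (fun i => cols2.map (fun c => c.getD i 0))

-- ===== PRECONDITION & SPEC =====
-- Pre_ excludes exactly the inputs where Python A raises IndexError: dependent_vars must have
-- two entries and both must be valid (possibly negative) indices into a row of length len(graph).
def Pre_generate_XOR_transitions_table (graph : List Int) (dependent_vars : List Int) : Prop :=
  2 ≤ dependent_vars.length ∧
    PySem.Raise.InRange graph.length dependent_vars.headI ∧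
    PySem.Raise.InRange graph.length dependent_vars.tail.headI
instance (graph : List Int) (dependent_vars : List Int) : Decidable (Pre_generate_XOR_transitions_table graph dependent_vars) := by unfold Pre_generate_XOR_transitions_table; infer_instance

def pvWitness_generate_XOR_transitions_table : List Int × List Int := ([5, 7], [0, 1])

def Spec_generate_XOR_transitions_table (graph : List Int) (dependent_vars : List Int) (out : List (List Int)) : Prop := out = generate_XOR_transitions_table_alt graph dependent_vars
instance (graph : List Int) (dependent_vars : List Int) (out : List (List Int)) : Decidable (Spec_generate_XOR_transitions_table graph dependent_vars out) := by unfold Spec_generate_XOR_transitions_table; infer_instance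

-- ===== CLAIM (what is proved, stated in full; the proofs are below) =====
def Claim_equal_generate_XOR_transitions_table : Prop := ∀ (graph : List Int) (dependent_vars : List Int), Dom_generate_XOR_transitions_table graph dependent_vars → Pre_generate_XOR_transitions_table graph dependent_vars → Spec_generate_XOR_transitions_table graph dependent_vars (generate_XOR_transitions_table graph dependent_vars)

-- ===== LEMMAS AND PROOFS =====

-- A's row i of the truth table: n bits of i, most significant first
def pvRowOf (n i : Nat) : List Int :=
  (List.range n).map (fun j => (((i >>> (n - 1 - j)) % 2 : Nat) : Int))

theorem pvRange_two_mul (m : Nat) :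
    List.range (2 * m) = (List.range m).flatMap (fun k => [2 * k, 2 * k + 1]) := by
  induction m with
  | zero => rfl
  | succ m ih =>
      have h2 : 2 * (m + 1) = (2 * m) + 1 + 1 := by ring
      rw [h2, List.range_succ, List.range_succ, List.range_succ, ih, List.flatMap_append]
      simp

theorem pvRowOf_step (n k b : Nat) (hb : b < 2) :
    pvRowOf (n + 1) (2 * k + b) = pvRowOf n k ++ [(b : Int)] := by
  unfold pvRowOf
  rw [List.range_succ, List.map_append]
  congr 1
  · apply List.map_congr_left
    intro j hj
    have hj' : j < n := List.mem_range.mp hj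
    have h1 : n + 1 - 1 - j = (n - 1 - j) + 1 := by omega
    rw [h1, Nat.shiftRight_succ_inside]
    have h2 : (2 * k + b) / 2 = k := by omega
    rw [h2]
  · simp only [List.map_cons, List.map_nil]
    have h3 : n + 1 - 1 - n = 0 := by omega
    rw [h3, Nat.shiftRight_zero]
    have h4 : (2 * k + b) % 2 = b := by omega
    rw [h4]

theorem pvProduct01_eq (n : Nat) :
    pvProduct01 n = (List.range (2 ^ n)).map (pvRowOf n) := by
  induction n with
  | zero => rfl
  | succ n ih =>
      have hpow : 2 ^ (n + 1) = 2 * 2 ^ n := by ring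
      rw [hpow, pvRange_two_mul, List.map_flatMap]
      show pvProduct01 (n + 1) = _
      rw [pvProduct01, ih, List.flatMap_map]
      apply List.flatMap_congr
      intro k _
      have h0 : pvRowOf (n + 1) (2 * k) = pvRowOf n k ++ [(0 : Int)] := by
        simpa using pvRowOf_step n k 0 (by omega)
      have h1 : pvRowOf (n + 1) (2 * k + 1) = pvRowOf n k ++ [(1 : Int)] := by
        simpa using pvRowOf_step n k 1 (by omega)
      simp [h0, h1]

theorem pvRepeat_getD (L : List Int) (k i : Nat) (hi : i < k * L.length) :
    (pvRepeat L k).getD i 0 = L.getD (i % L.length) 0 := by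
  induction k generalizing i with
  | zero => omega
  | succ k ih =>
      have hL : 0 < L.length := by
        rcases Nat.eq_zero_or_pos L.length with h0 | h
        · rw [h0, Nat.mul_zero] at hi; omega
        · exact h
      rw [Nat.succ_mul] at hi
      unfold pvRepeat at *
      rw [List.replicate_succ, List.flatten_cons]
      by_cases h : i < L.length
      · rw [List.getD_append _ _ _ _ h, Nat.mod_eq_of_lt h]
      · rw [List.getD_append_right _ _ _ _ (by omega)]
        rw [ih (i - L.length) (by omega)]
        rw [← Nat.mod_eq_sub_mod (by omega)]

theorem pvCol_getD (n j i : Nat) (hj : j < n) (hi : i < 2 ^ n) :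
    (pvCol n j).getD i 0 = (((i >>> (n - 1 - j)) % 2 : Nat) : Int) := by
  unfold pvCol pvRepeat
  rw [Nat.shiftRight_eq_div_pow]
  have hsz : 2 ^ j * (2 ^ (n - 1 - j) + 2 ^ (n - 1 - j)) = 2 ^ n := by
    have h : 2 ^ (n - 1 - j) + 2 ^ (n - 1 - j) = 2 ^ (n - 1 - j + 1) := by ring
    rw [h, ← pow_add]
    congr 1
    omega
  have hbpos : 0 < 2 ^ (n - 1 - j) := Nat.two_pow_pos _
  set b := 2 ^ (n - 1 - j) with hb
  clear_value b
  have hi' : i < 2 ^ j * (b + b) := by omega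
  have hlen : (List.replicate b (0:Int) ++ List.replicate b 1).length = b + b := by simp
  have : ((List.replicate (2 ^ j) (List.replicate b (0:Int) ++ List.replicate b 1)).flatten).getD i 0
      = (List.replicate b (0:Int) ++ List.replicate b 1).getD (i % (b + b)) 0 := by
    have := pvRepeat_getD (List.replicate b (0:Int) ++ List.replicate b 1) (2 ^ j) i
      (by rw [hlen]; exact hi')
    unfold pvRepeat at this
    rw [this, hlen]
  rw [this]
  have hmod : i % (b + b) < b + b := Nat.mod_lt _ (by omega)
  have hdiv : i % (b + b) / b = i / b % 2 := by
    have h2 := Nat.mod_mul_right_div_self i b 2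
    have h3 : b * 2 = b + b := by ring
    rw [h3] at h2
    exact h2
  by_cases hcase : i % (b + b) < b
  · rw [List.getD_append _ _ _ _ (by rw [List.length_replicate]; exact hcase), List.getD_replicate]
    · have h0 : i / b % 2 = 0 := by
        rw [← hdiv]
        exact Nat.div_eq_of_lt hcase
      rw [h0]
      simp
    · exact hcase
  · rw [List.getD_append_right _ _ _ _ (by rw [List.length_replicate]; omega)]
    rw [List.length_replicate, List.getD_replicate]
    · have h1 : i / b % 2 = 1 := by
        rw [← hdiv]
        have ha : 1 ≤ i % (b + b) / b := by
          rw [Nat.le_div_iff_mul_le hbpos]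
          omega
        have hc : i % (b + b) / b < 2 := by
          rw [Nat.div_lt_iff_lt_mul hbpos]
          omega
        omega
      rw [h1]
      simp
    · omega

-- the i-th entries of B's plain columns form A's row i
theorem pvCols_row (n i : Nat) (hi : i < 2 ^ n) :
    ((List.range n).map (fun j => pvCol n j)).map (fun c => c.getD i 0) = pvRowOf n i := by
  unfold pvRowOf
  rw [List.map_map]
  apply List.map_congr_left
  intro j hj
  exact pvCol_getD n j i (List.mem_range.mp hj) hi

theorem pvBit_lt (n j i : Nat) : (i >>> (n - 1 - j)) % 2 < 2 := Nat.mod_lt _ (by omega)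

-- resolved nonnegative index of a Python index d into a list of length n
theorem pv_resolve (n : Nat) (d : Int) (h : PySem.Raise.InRange n d) :
    ∃ d' : Nat, d' < n ∧ ∀ {α : Type} (L : List α), L.length = n → PySem.List.pyGet? L d = L[d']? := by
  rcases h with ⟨h1, h2⟩
  by_cases hd : 0 ≤ d
  · refine ⟨d.toNat, by omega, ?_⟩
    intro α L hL
    rw [PySem.List.pyGet?_of_nonneg L hd]
  · refine ⟨n - (-d).toNat, by omega, ?_⟩
    intro α L hL
    have hk : d = -(((-d).toNat : Nat) : Int) := by omega
    rw [hk, PySem.List.pyGet?_neg_natCast L _ (by omega) (by omega), hL]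
    congr 1
    omega

-- ===== VERDICT (by name: the statement is the Claim_ definition above) =====
theorem generate_XOR_transitions_table_spec : Claim_equal_generate_XOR_transitions_table := by
  intro graph dependent_vars _ hpre
  obtain ⟨hlen2, hr0, hr1⟩ := hpre
  show _ = _
  set n := graph.length with hn
  -- dependent_vars[0] and dependent_vars[1]
  obtain ⟨v0, v1, rest, hdv⟩ : ∃ v0 v1 rest, dependent_vars = v0 :: v1 :: rest := by
    match dependent_vars, hlen2 with
    | v0 :: v1 :: rest, _ => exact ⟨v0, v1, rest, rfl⟩
  have h0 : PySem.List.pyGet? dependent_vars 0 = some v0 := by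
    rw [hdv]; exact PySem.List.pyGet?_zero_cons v0 (v1 :: rest)
  have h1 : PySem.List.pyGet? dependent_vars 1 = some v1 := by
    rw [hdv]
    have h := PySem.List.pyGet?_ofNat (v0 :: v1 :: rest) 1 (by simp)
    simp only [List.getElem_cons_succ, List.getElem_cons_zero, Nat.cast_one] at h
    exact h
  rw [hdv] at hr0 hr1
  simp only [List.headI, List.tail_cons] at hr0 hr1
  obtain ⟨d0, hd0n, hd0⟩ := pv_resolve n v0 hr0
  obtain ⟨d1, hd1n, hd1⟩ := pv_resolve n v1 hr1
  simp only [generate_XOR_transitions_table, generate_XOR_transitions_table_alt,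
    pvProduct01_eq, List.map_map, ← hn]
  -- columns list and its length facts
  have hcolslen : ((List.range n).map (fun j => pvCol n j)).length = n := by simp
  have hcollen : ∀ j < n, (pvCol n j).length = 2 ^ n := by
    intro j hj
    unfold pvCol pvRepeat
    simp only [List.length_flatten, List.map_replicate, List.length_append,
      List.length_replicate, List.sum_replicate, smul_eq_mul]
    have : 2 ^ (n - 1 - j) + 2 ^ (n - 1 - j) = 2 ^ (n - 1 - j + 1) := by ring
    rw [this, ← pow_add]
    congr 1
    omega
  have hc0 : PySem.List.pyGet? ((List.range n).map (fun j => pvCol n j)) v0 = some (pvCol n d0) := by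
    rw [hd0 _ hcolslen]
    simp [hd0n]
  have hc1 : PySem.List.pyGet? ((List.range n).map (fun j => pvCol n j)) v1 = some (pvCol n d1) := by
    rw [hd1 _ hcolslen]
    simp [hd1n]
  apply List.map_congr_left
  intro i hi
  have hi' : i < 2 ^ n := List.mem_range.mp hi
  have hrowlen : (pvRowOf n i).length = n := by simp [pvRowOf]
  -- B's row
  simp only [h0, h1, hc0, hc1, Option.bind_some, Option.getD_some,
    List.map_append, List.map_cons, List.map_nil]
  rw [pvCols_row n i hi']
  -- A's row
  simp only [Function.comp_apply]
  unfold pvXorAppend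
  simp only [h0, h1, Option.bind_some]
  rw [hd0 _ hrowlen, hd1 _ hrowlen]
  congr 1
  -- the appended bit
  have hz : (List.zipWith (fun a b => Int.xor a b) (pvCol n d0) (pvCol n d1)).getD i 0
      = Int.xor ((pvCol n d0).getD i 0) ((pvCol n d1).getD i 0) := by
    have hL0 := hcollen d0 hd0n
    have hL1 := hcollen d1 hd1n
    rw [List.getD_eq_getElem _ _ (by simp [hL0, hL1]; omega),
      List.getElem_zipWith,
      List.getD_eq_getElem _ _ (by omega), List.getD_eq_getElem _ _ (by omega)]
  rw [hz, pvCol_getD n d0 i hd0n hi', pvCol_getD n d1 i hd1n hi']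
  have hg0 : (pvRowOf n i)[d0]? = some (((i >>> (n - 1 - d0)) % 2 : Nat) : Int) := by
    unfold pvRowOf
    rw [List.getElem?_map, List.getElem?_range hd0n]
    rfl
  have hg1 : (pvRowOf n i)[d1]? = some (((i >>> (n - 1 - d1)) % 2 : Nat) : Int) := by
    unfold pvRowOf
    rw [List.getElem?_map, List.getElem?_range hd1n]
    rfl
  rw [hg0, hg1]
  have b0 := pvBit_lt n d0 i
  have b1 := pvBit_lt n d1 i
  set x0 := (i >>> (n - 1 - d0)) % 2 with hx0
  set x1 := (i >>> (n - 1 - d1)) % 2 with hx1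
  clear_value x0 x1
  interval_cases x0 <;> interval_cases x1 <;> decide
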